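-- pv_equiv track=rewrite | github.com/srj737/sbailie-aoc-2020 | day6.py | process_forms
-- ===== SOURCE A (Python) =====
-- def calc_unique_yeses(code):
--     string = code.replace(' ', '')  # Strip Spaces
--     sorted_characters = sorted(string)  # Sort letters into a list
--     no_duplicates = list(
--         dict.fromkeys(sorted_characters))  # Convert to dictionary then back to a list to remove duplicates
--     count = len(no_duplicates)  # Count unique answers
--     return count, no_duplicates
--
-- def calc_unique_yeses_part2(code):
--     list_of_peep = code.split(' ')  # Strip into a list of each person
--     cumulative = calc_unique_yeses(list_of_peep[0])[1]  # Initialise with first person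
--     for persons_code in list_of_peep:
--         this_person = calc_unique_yeses(persons_code)[1]
--         cumulative = list(set(this_person) & set(cumulative))
--     count = len(cumulative)  # Count unique answers
--     return count
--
-- def process_forms(array, part=1):
--     sum_value = 0
--     for form in array:
--         if part == 1:
--             sum_value += calc_unique_yeses(form)[0]
--         if part == 2:
--             sum_value += calc_unique_yeses_part2(form)
--     return sum_value
-- ===== SOURCE B (Python) =====
-- def process_forms(array, part=1):
--     total = 0
--     for form in array:
--         people = form.split(' ')
--         freq = {}
--         seen_at = {}
--         for i, p in enumerate(people):
--             for c in p:
--                 if seen_at.get(c) != i: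
--                     seen_at[c] = i
--                     freq[c] = freq.get(c, 0) + 1
--         if part == 1:
--             total += len(freq)
--         elif part == 2:
--             total += sum(1 for v in freq.values() if v == len(people))
--     return total
-- ===== Notes on version B (the rewrite author's own statement) =====
-- stated objective: alternative
-- what changed: Per form, B makes a single counting pass that builds one dict mapping each character to the number of people whose form contains it (a last-seen-index dict dedups within a person), then answers part 1 as the dict's size and part 2 as the number of values equal to the number of people, instead of A's per-person sort + dict.fromkeys dedup plus an explicit cumulative set-intersection loop.
import Mathlib
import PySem

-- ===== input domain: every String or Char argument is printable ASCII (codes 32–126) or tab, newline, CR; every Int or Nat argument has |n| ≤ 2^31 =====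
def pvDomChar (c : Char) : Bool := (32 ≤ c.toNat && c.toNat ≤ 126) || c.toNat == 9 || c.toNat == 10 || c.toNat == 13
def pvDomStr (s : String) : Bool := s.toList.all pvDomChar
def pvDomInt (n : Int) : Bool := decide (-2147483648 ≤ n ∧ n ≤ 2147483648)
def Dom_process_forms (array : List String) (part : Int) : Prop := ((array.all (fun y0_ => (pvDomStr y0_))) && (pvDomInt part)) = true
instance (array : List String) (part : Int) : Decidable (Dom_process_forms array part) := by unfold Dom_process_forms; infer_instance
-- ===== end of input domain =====

-- B replaces A's per-form sort/dedup and cumulative set-intersection loop by one histogram pass: a dict counting in how many people of the form each character occurs (with a last-seen-index dict for per-person dedup); part 1 reads the histogram's size, part 2 counts values equal to the number of people. Objective: alternative.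


-- ===== PORT A =====
-- calc_unique_yeses(code) -> (count, no_duplicates)
def pvCalcUniqueYeses (code : List Char) : Int × List Char :=
  let string := PySem.Chars.replace code [' '] []          -- code.replace(' ', '')
  let sorted_characters := PySem.List.sorted string (fun x => x) false   -- sorted(string)
  let no_duplicates := PySem.List.dedup sorted_characters  -- list(dict.fromkeys(...))
  ((no_duplicates.length : Int), no_duplicates)

-- calc_unique_yeses_part2(code)
def pvCalcUniqueYesesPart2 (code : List Char) : Int :=
  let list_of_peep := PySem.Chars.splitOn code [' ']       -- code.split(' ')
  -- list_of_peep[0]: str.split(' ') always returns a nonempty list, so the default is never used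
  let cumulative := (pvCalcUniqueYeses (list_of_peep.headD [])).2
  let cumulative := list_of_peep.foldl (fun cumulative persons_code =>
      PySem.Set.inter (PySem.Set.ofList (pvCalcUniqueYeses persons_code).2)
        (PySem.Set.ofList cumulative)) cumulative          -- list(set(this_person) & set(cumulative))
  (cumulative.length : Int)

def process_forms (array : List String) (part : Int) : Int :=
  array.foldl (fun sum_value form =>
    let sum_value := if part = 1 then sum_value + (pvCalcUniqueYeses form.toList).1 else sum_value
    if part = 2 then sum_value + pvCalcUniqueYesesPart2 form.toList else sum_value) 0

-- ===== PORT B =====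
def process_forms_alt (array : List String) (part : Int) : Int :=
  array.foldl (fun total form =>
    let people := PySem.Chars.splitOn form.toList [' ']    -- people = form.split(' ')
    -- for i, p in enumerate(people): for c in p: if seen_at.get(c) != i: seen_at[c] = i; freq[c] = freq.get(c, 0) + 1
    let fs := (PySem.List.enumerate people 0).foldl
      (fun (fs : PySem.Dict Char Int × PySem.Dict Char Int) ip =>
        ip.2.foldl (fun fs c =>
          if fs.2.get? c ≠ some ip.1 then
            (fs.1.insert c (fs.1.getD c 0 + 1), fs.2.insert c ip.1)
          else fs) fs)
      (PySem.Dict.empty, PySem.Dict.empty)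
    let freq := fs.1
    if part = 1 then total + (freq.size : Int)             -- total += len(freq)
    else if part = 2 then                                  -- total += sum(1 for v in freq.values() if v == len(people))
      total + ((freq.values.countP (fun v => v == (people.length : Int)) : Nat) : Int)
    else total) 0

-- ===== PRECONDITION & SPEC =====
def Spec_process_forms (array : List String) (part : Int) (out : Int) : Prop := out = process_forms_alt array part
instance (array : List String) (part : Int) (out : Int) : Decidable (Spec_process_forms array part out) := by unfold Spec_process_forms; infer_instance

-- ===== CLAIM (what is proved, stated in full; the proofs are below) =====
def Claim_equal_process_forms : Prop := ∀ (array : List String) (part : Int), Dom_process_forms array part → Spec_process_forms array part (process_forms array part)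

-- ===== LEMMAS AND PROOFS =====

-- code.replace(' ', '') is exactly the filter removing spaces
theorem pv_replace_go_space (fuel : Nat) : ∀ (l acc : List Char), l.length ≤ fuel →
    PySem.Chars.replace.go [' '] [] fuel l acc = acc.reverse ++ l.filter (fun c => c ≠ ' ') := by
  induction fuel with
  | zero => intro l acc h; cases l with
    | nil => simp [PySem.Chars.replace.go]
    | cons c t => simp at h
  | succ n ih =>
    intro l acc h
    cases l with
    | nil => simp [PySem.Chars.replace.go]
    | cons c t =>
      by_cases hc : c = ' '
      · subst hc
        rw [show PySem.Chars.replace.go [' '] [] (n+1) (' ' :: t) acc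
              = PySem.Chars.replace.go [' '] [] n t acc by
            simp [PySem.Chars.replace.go, List.isPrefixOf]]
        rw [ih t acc (by simpa using Nat.le_of_succ_le_succ (by simpa using h))]
        simp
      · have hc' : ¬(' ' = c) := fun h => hc h.symm
        rw [show PySem.Chars.replace.go [' '] [] (n+1) (c :: t) acc
              = PySem.Chars.replace.go [' '] [] n t (c :: acc) by
            simp [PySem.Chars.replace.go, List.isPrefixOf, hc']]
        rw [ih t (c :: acc) (by simpa using Nat.le_of_succ_le_succ (by simpa using h))]
        simp [hc]

theorem pv_replace_space (cs : List Char) :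
    PySem.Chars.replace cs [' '] [] = cs.filter (fun c => c ≠ ' ') := by
  simp [PySem.Chars.replace, pv_replace_go_space cs.length cs [] le_rfl]

-- code.split(' '): the concatenation of the pieces is the string with spaces removed
theorem pv_splitOn_go_flat (fuel : Nat) : ∀ (l cur : List Char) (acc : List (List Char)),
    l.length < fuel →
    (PySem.Chars.splitOn.go [' '] fuel l cur acc).flatten
      = acc.reverse.flatten ++ cur.reverse ++ l.filter (fun c => c ≠ ' ') := by
  induction fuel with
  | zero => intro l cur acc h; exact absurd h (Nat.not_lt_zero _)
  | succ n ih =>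
    intro l cur acc h
    cases l with
    | nil =>
      rw [show PySem.Chars.splitOn.go [' '] (n+1) [] cur acc = (cur.reverse :: acc).reverse by
            simp [PySem.Chars.splitOn.go]]
      simp
    | cons c t =>
      by_cases hc : c = ' '
      · subst hc
        rw [show PySem.Chars.splitOn.go [' '] (n+1) (' ' :: t) cur acc
              = PySem.Chars.splitOn.go [' '] n t [] (cur.reverse :: acc) by
            simp [PySem.Chars.splitOn.go, List.isPrefixOf]]
        rw [ih t [] _ (by simp at h ⊢; omega)]
        simp
      · have hc' : ¬(' ' = c) := fun h => hc h.symm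
        rw [show PySem.Chars.splitOn.go [' '] (n+1) (c :: t) cur acc
              = PySem.Chars.splitOn.go [' '] n t (c :: cur) acc by
            simp [PySem.Chars.splitOn.go, List.isPrefixOf, hc']]
        rw [ih t (c :: cur) acc (by simp at h ⊢; omega)]
        simp [hc]

theorem pv_splitOn_flat (cs : List Char) :
    (PySem.Chars.splitOn cs [' ']).flatten = cs.filter (fun c => c ≠ ' ') := by
  have := pv_splitOn_go_flat (cs.length + 1) cs [] [] (by omega)
  simpa [PySem.Chars.splitOn] using this

-- pieces of code.split(' ') contain no space
theorem pv_splitOn_no_space (cs : List Char) :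
    ∀ p ∈ PySem.Chars.splitOn cs [' '], ' ' ∉ p := by
  intro p hp hsp
  have : ' ' ∈ (PySem.Chars.splitOn cs [' ']).flatten := List.mem_flatten.mpr ⟨p, hp, hsp⟩
  rw [pv_splitOn_flat] at this
  simp [List.mem_filter] at this

-- code.split(' ') is never empty
theorem pv_splitOn_go_ne_nil (fuel : Nat) : ∀ (l cur : List Char) (acc : List (List Char)),
    PySem.Chars.splitOn.go [' '] fuel l cur acc ≠ [] := by
  induction fuel with
  | zero => intro l cur acc; simp [PySem.Chars.splitOn.go]
  | succ n ih =>
    intro l cur acc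
    cases l with
    | nil => simp [PySem.Chars.splitOn.go]
    | cons c t =>
      by_cases hc : c = ' '
      · subst hc
        rw [show PySem.Chars.splitOn.go [' '] (n+1) (' ' :: t) cur acc
              = PySem.Chars.splitOn.go [' '] n t [] (cur.reverse :: acc) by
            simp [PySem.Chars.splitOn.go, List.isPrefixOf]]
        exact ih _ _ _
      · have hc' : ¬(' ' = c) := fun h => hc h.symm
        rw [show PySem.Chars.splitOn.go [' '] (n+1) (c :: t) cur acc
              = PySem.Chars.splitOn.go [' '] n t (c :: cur) acc by
            simp [PySem.Chars.splitOn.go, List.isPrefixOf, hc']]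
        exact ih _ _ _

theorem pv_splitOn_ne_nil (cs : List Char) : PySem.Chars.splitOn cs [' '] ≠ [] := by
  exact pv_splitOn_go_ne_nil _ _ _ _

-- two nodup lists with the same members have the same length
theorem pv_len_eq_of_nodup_mem {α : Type} (l₁ l₂ : List α) (h₁ : l₁.Nodup) (h₂ : l₂.Nodup)
    (hm : ∀ a, a ∈ l₁ ↔ a ∈ l₂) : l₁.length = l₂.length :=
  ((List.perm_ext_iff_of_nodup h₁ h₂).mpr hm).length_eq

-- membership in A's per-person dedup list
theorem pv_mem_calcA (p : List Char) (c : Char) :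
    c ∈ (pvCalcUniqueYeses p).2 ↔ c ∈ p ∧ c ≠ ' ' := by
  simp [pvCalcUniqueYeses, pv_replace_space, PySem.List.mem_sorted, List.mem_filter]

theorem pv_nodup_calcA (p : List Char) : (pvCalcUniqueYeses p).2.Nodup := by
  simp [pvCalcUniqueYeses]

-- A's cumulative-intersection loop: nodup + membership
theorem pv_foldA (L : List (List Char)) : ∀ (cum : List Char), cum.Nodup →
    (L.foldl (fun cumulative persons_code =>
        PySem.Set.inter (PySem.Set.ofList (pvCalcUniqueYeses persons_code).2)
          (PySem.Set.ofList cumulative)) cum).Nodup ∧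
    ∀ c, (c ∈ L.foldl (fun cumulative persons_code =>
        PySem.Set.inter (PySem.Set.ofList (pvCalcUniqueYeses persons_code).2)
          (PySem.Set.ofList cumulative)) cum ↔ c ∈ cum ∧ ∀ p ∈ L, c ∈ p ∧ c ≠ ' ') := by
  induction L with
  | nil => intro cum h; simpa using h
  | cons p L ih =>
    intro cum h
    have hstep : (PySem.Set.inter (PySem.Set.ofList (pvCalcUniqueYeses p).2)
        (PySem.Set.ofList cum)).Nodup :=
      PySem.Set.nodup_inter _ _ (PySem.Set.nodup_ofList _)
    obtain ⟨hn, hm⟩ := ih _ hstep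
    refine ⟨hn, fun c => ?_⟩
    rw [List.foldl_cons, hm c]
    simp only [PySem.Set.mem_inter, PySem.Set.mem_ofList, pv_mem_calcA, List.mem_cons]
    constructor
    · rintro ⟨⟨⟨hp, hne⟩, hc⟩, hall⟩
      refine ⟨hc, ?_⟩
      rintro q (rfl | hq)
      · exact ⟨hp, hne⟩
      · exact hall q hq
    · rintro ⟨hc, hall⟩
      exact ⟨⟨hall p (Or.inl rfl), hc⟩, fun q hq => hall q (Or.inr hq)⟩

-- ---- B's histogram fold ----

-- the value B's freq dict holds for char c after fully processing the persons P and the prefix q of the current person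
def pvVal (P : List (List Char)) (q : List Char) (c : Char) : Int :=
  ((P.countP (fun p => decide (c ∈ p)) : Nat) : Int) + (if c ∈ q then 1 else 0)

-- one person's inner loop: freq stays the first-occurrence histogram, seen marks this person's chars with i
theorem pv_inner (i : Int) (P : List (List Char)) (p : List Char) :
    ∀ (q : List Char) (freq seen : PySem.Dict Char Int),
    freq.items = (PySem.Set.ofList (P.flatten ++ q)).map (fun c => (c, pvVal P q c)) →
    (∀ c, seen.get? c = some i ↔ c ∈ q) →
    (∀ c j, c ∉ q → seen.get? c = some j → j < i) →
    ((p.foldl (fun (fs : PySem.Dict Char Int × PySem.Dict Char Int) c =>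
        if fs.2.get? c ≠ some i then
          (fs.1.insert c (fs.1.getD c 0 + 1), fs.2.insert c i)
        else fs) (freq, seen)).1.items
        = (PySem.Set.ofList (P.flatten ++ (q ++ p))).map (fun c => (c, pvVal P (q ++ p) c)))
    ∧ (∀ c, ((p.foldl (fun (fs : PySem.Dict Char Int × PySem.Dict Char Int) c =>
        if fs.2.get? c ≠ some i then
          (fs.1.insert c (fs.1.getD c 0 + 1), fs.2.insert c i)
        else fs) (freq, seen)).2.get? c = some i ↔ c ∈ q ++ p))
    ∧ (∀ c j, c ∉ q ++ p → ((p.foldl (fun (fs : PySem.Dict Char Int × PySem.Dict Char Int) c =>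
        if fs.2.get? c ≠ some i then
          (fs.1.insert c (fs.1.getD c 0 + 1), fs.2.insert c i)
        else fs) (freq, seen)).2.get? c = some j) → j < i) := by
  induction p with
  | nil =>
    intro q freq seen hf hs1 hs2
    simpa using ⟨hf, hs1, hs2⟩
  | cons c p ih =>
    intro q freq seen hf hs1 hs2
    have hassoc : q ++ c :: p = (q ++ [c]) ++ p := by simp
    rw [hassoc, List.foldl_cons]
    by_cases hcq : c ∈ q
    · -- skip branch: seen already maps c to i
      have hget : seen.get? c = some i := (hs1 c).mpr hcq
      rw [if_neg (by simp [hget])]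
      have hset : PySem.Set.ofList (P.flatten ++ (q ++ [c])) = PySem.Set.ofList (P.flatten ++ q) := by
        rw [← List.append_assoc, PySem.Set.ofList_append_singleton,
          PySem.Set.add_of_mem (by simp [PySem.Set.mem_ofList, hcq])]
      have hval : (fun a => (a, pvVal P (q ++ [c]) a)) = (fun a => (a, pvVal P q a)) := by
        funext a
        simp only [pvVal, List.mem_append, List.mem_singleton]
        congr 2
        by_cases hac : a = c
        · simp [hac, hcq]
        · simp [hac]
      exact ih (q ++ [c]) freq seen (by rw [hset, hval]; exact hf)
        (fun a => by rw [hs1 a]; constructor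
                     · intro h; exact List.mem_append_left _ h
                     · intro h; rcases List.mem_append.mp h with h | h
                       · exact h
                       · simp at h; exact h ▸ hcq)
        (fun a j ha => hs2 a j (fun h => ha (List.mem_append_left _ h)))
    · -- insert branch: c not yet seen for this person
      have hget : seen.get? c ≠ some i := fun h => hcq ((hs1 c).mp h)
      rw [if_pos (by simp [hget])]
      have hkeys : freq.keys = PySem.Set.ofList (P.flatten ++ q) := by
        show freq.items.map (·.1) = _
        rw [hf, List.map_map]
        exact List.map_id _
      have hnodk : freq.keys.Nodup := by rw [hkeys]; exact PySem.Set.nodup_ofList _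
      -- the updated freq's items
      have hfreq' : (freq.insert c (freq.getD c 0 + 1)).items
          = (PySem.Set.ofList (P.flatten ++ (q ++ [c]))).map (fun a => (a, pvVal P (q ++ [c]) a)) := by
        by_cases hcF : c ∈ P.flatten
        · -- existing key: overwrite in place
          have hcL : c ∈ PySem.Set.ofList (P.flatten ++ q) := by
            simp [PySem.Set.mem_ofList, hcF]
          have hitem : (c, pvVal P q c) ∈ freq.items := by
            rw [hf]; exact List.mem_map.mpr ⟨c, hcL, rfl⟩
          have hgetD : freq.getD c 0 = pvVal P q c :=
            PySem.Dict.getD_of_mem_items freq hitem hnodk 0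
          have hcont : freq.contains c = true :=
            (PySem.Dict.contains_iff_mem_keys _ _).mpr (hkeys ▸ hcL)
          rw [PySem.Dict.items_insert_of_contains freq _ hcont, hf, List.map_map,
            show PySem.Set.ofList (P.flatten ++ (q ++ [c])) = PySem.Set.ofList (P.flatten ++ q) by
              rw [← List.append_assoc, PySem.Set.ofList_append_singleton,
                PySem.Set.add_of_mem hcL]]
          apply List.map_congr_left
          intro a _
          simp only [Function.comp]
          by_cases hac : a = c
          · subst hac
            simp only [beq_self_eq_true, if_pos]
            have : pvVal P (q ++ [a]) a = pvVal P q a + 1 := by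
              simp [pvVal, hcq]
            rw [this, hgetD]
          · simp only [beq_iff_eq, if_neg hac]
            have : pvVal P (q ++ [c]) a = pvVal P q a := by
              simp only [pvVal, List.mem_append, List.mem_singleton]
              congr 2
              simp [hac]
            rw [this]
        · -- fresh key: append
          have hcL : c ∉ PySem.Set.ofList (P.flatten ++ q) := by
            simp [PySem.Set.mem_ofList, hcF, hcq]
          have hcont : freq.contains c = false := by
            rw [PySem.Dict.contains_eq_decide_mem_keys, hkeys]
            simpa using hcL
          have hgetD : freq.getD c 0 = 0 := PySem.Dict.getD_of_not_contains freq 0 hcont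
          rw [PySem.Dict.items_insert_of_not_contains freq _ hcont, hf, hgetD,
            show PySem.Set.ofList (P.flatten ++ (q ++ [c]))
                = PySem.Set.ofList (P.flatten ++ q) ++ [c] by
              rw [← List.append_assoc, PySem.Set.ofList_append_singleton,
                PySem.Set.add_of_not_mem hcL]]
          rw [List.map_append]
          congr 1
          · apply List.map_congr_left
            intro a ha
            have hac : a ≠ c := fun h => hcL (h ▸ ha)
            have : pvVal P (q ++ [c]) a = pvVal P q a := by
              simp only [pvVal, List.mem_append, List.mem_singleton]
              congr 2
              simp [hac]
            rw [this]
          · have hcnt : P.countP (fun p => decide (c ∈ p)) = 0 := by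
              apply List.countP_eq_zero.mpr
              intro p hp
              simp only [decide_eq_true_eq]
              exact fun hcp => hcF (List.mem_flatten.mpr ⟨p, hp, hcp⟩)
            simp [pvVal, hcnt, hcq]
      have hseen1 : ∀ a, (seen.insert c i).get? a = some i ↔ a ∈ q ++ [c] := by
        intro a
        rw [PySem.Dict.get?_insert]
        by_cases hac : a = c
        · simp [hac]
        · rw [if_neg hac, hs1 a]
          simp [hac]
      have hseen2 : ∀ a j, a ∉ q ++ [c] → (seen.insert c i).get? a = some j → j < i := by
        intro a j ha hj
        have hac : a ≠ c := fun h => ha (by simp [h])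
        rw [PySem.Dict.get?_insert, if_neg hac] at hj
        exact hs2 a j (fun h => ha (List.mem_append_left _ h)) hj
      exact ih (q ++ [c]) _ _ hfreq' hseen1 hseen2

-- the outer loop over enumerate(people): at each person boundary the histogram describes the processed prefix
theorem pv_outer (L : List (List Char)) : ∀ (P : List (List Char))
    (freq seen : PySem.Dict Char Int),
    freq.items = (PySem.Set.ofList P.flatten).map (fun c => (c, pvVal P [] c)) →
    (∀ c j, seen.get? c = some j → j < (P.length : Int)) →
    ((PySem.List.enumerate L (P.length : Int)).foldl
        (fun (fs : PySem.Dict Char Int × PySem.Dict Char Int) ip =>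
          ip.2.foldl (fun fs c =>
            if fs.2.get? c ≠ some ip.1 then
              (fs.1.insert c (fs.1.getD c 0 + 1), fs.2.insert c ip.1)
            else fs) fs) (freq, seen)).1.items
      = (PySem.Set.ofList (P ++ L).flatten).map (fun c => (c, pvVal (P ++ L) [] c)) := by
  induction L with
  | nil =>
    intro P freq seen hf hs
    simpa [PySem.List.enumerate_nil] using hf
  | cons p L ih =>
    intro P freq seen hf hs
    rw [PySem.List.enumerate_cons, List.foldl_cons]
    have hs1 : ∀ c, seen.get? c = some (P.length : Int) ↔ c ∈ ([] : List Char) := by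
      intro c
      simp only [List.not_mem_nil, iff_false]
      intro h
      exact absurd (hs c _ h) (lt_irrefl _)
    have hs2 : ∀ c j, c ∉ ([] : List Char) → seen.get? c = some j → j < (P.length : Int) :=
      fun c j _ h => hs c j h
    obtain ⟨hf', hm', hb'⟩ := pv_inner (P.length : Int) P p [] freq seen
      (by simpa using hf) hs1 hs2
    have hval : (fun c => (c, pvVal P ([] ++ p) c)) = (fun c => (c, pvVal (P ++ [p]) [] c)) := by
      funext c
      simp only [pvVal, List.countP_append, List.countP_cons, List.countP_nil,
        List.flatten_append, Prod.mk.injEq, true_and]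
      by_cases hcp : c ∈ p <;> simp [hcp] <;> omega
    have hflat : P.flatten ++ ([] ++ p) = (P ++ [p]).flatten := by simp
    have hstart : (P.length : Int) + 1 = (((P ++ [p]).length : Nat) : Int) := by
      push_cast; simp
    have hres := ih (P ++ [p])
      ((p.foldl (fun (fs : PySem.Dict Char Int × PySem.Dict Char Int) c =>
          if fs.2.get? c ≠ some (P.length : Int) then
            (fs.1.insert c (fs.1.getD c 0 + 1), fs.2.insert c (P.length : Int))
          else fs) (freq, seen)).1)
      ((p.foldl (fun (fs : PySem.Dict Char Int × PySem.Dict Char Int) c =>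
          if fs.2.get? c ≠ some (P.length : Int) then
            (fs.1.insert c (fs.1.getD c 0 + 1), fs.2.insert c (P.length : Int))
          else fs) (freq, seen)).2)
      (by rw [hf', ← hval, ← hflat])
      (by intro c j hj
          rw [← hstart]
          by_cases hcp : c ∈ p
          · have := (hm' c).mpr (by simpa using hcp)
            rw [this] at hj
            have hje : j = (P.length : Int) := (Option.some.inj hj).symm
            omega
          · have := hb' c j (by simpa using hcp) hj
            omega)
    rw [← hstart] at hres
    rw [show (P ++ [p]) ++ L = P ++ (p :: L) by simp] at hres
    exact hres

-- the full per-form histogram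
theorem pv_hist (people : List (List Char)) :
    ((PySem.List.enumerate people 0).foldl
        (fun (fs : PySem.Dict Char Int × PySem.Dict Char Int) ip =>
          ip.2.foldl (fun fs c =>
            if fs.2.get? c ≠ some ip.1 then
              (fs.1.insert c (fs.1.getD c 0 + 1), fs.2.insert c ip.1)
            else fs) fs) (PySem.Dict.empty, PySem.Dict.empty)).1.items
      = (PySem.Set.ofList people.flatten).map
          (fun c => (c, ((people.countP (fun p => decide (c ∈ p)) : Nat) : Int))) := by
  have := pv_outer people [] PySem.Dict.empty PySem.Dict.empty
    (by simp [PySem.Dict.items]; rfl)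
    (by intro c j h; rw [PySem.Dict.get?_empty] at h; exact absurd h (by simp))
  simpa [pvVal] using this

-- part 1 per-form agreement
theorem pv_part1_eq (cs : List Char) :
    (pvCalcUniqueYeses cs).1
      = (((PySem.List.enumerate (PySem.Chars.splitOn cs [' ']) 0).foldl
          (fun (fs : PySem.Dict Char Int × PySem.Dict Char Int) ip =>
            ip.2.foldl (fun fs c =>
              if fs.2.get? c ≠ some ip.1 then
                (fs.1.insert c (fs.1.getD c 0 + 1), fs.2.insert c ip.1)
              else fs) fs) (PySem.Dict.empty, PySem.Dict.empty)).1.size : Int) := by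
  have hsize : ((PySem.List.enumerate (PySem.Chars.splitOn cs [' ']) 0).foldl
          (fun (fs : PySem.Dict Char Int × PySem.Dict Char Int) ip =>
            ip.2.foldl (fun fs c =>
              if fs.2.get? c ≠ some ip.1 then
                (fs.1.insert c (fs.1.getD c 0 + 1), fs.2.insert c ip.1)
              else fs) fs) (PySem.Dict.empty, PySem.Dict.empty)).1.size
      = (PySem.Set.ofList ((PySem.Chars.splitOn cs [' ']).flatten)).length := by
    show ((PySem.List.enumerate (PySem.Chars.splitOn cs [' ']) 0).foldl
          (fun (fs : PySem.Dict Char Int × PySem.Dict Char Int) ip =>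
            ip.2.foldl (fun fs c =>
              if fs.2.get? c ≠ some ip.1 then
                (fs.1.insert c (fs.1.getD c 0 + 1), fs.2.insert c ip.1)
              else fs) fs) (PySem.Dict.empty, PySem.Dict.empty)).1.items.length = _
    rw [pv_hist, List.length_map]
  rw [hsize, pv_splitOn_flat]
  have hlen : (pvCalcUniqueYeses cs).2.length
      = (PySem.Set.ofList (cs.filter (fun c => c ≠ ' '))).length := by
    apply pv_len_eq_of_nodup_mem _ _ (pv_nodup_calcA cs) (PySem.Set.nodup_ofList _)
    intro a
    rw [pv_mem_calcA, PySem.Set.mem_ofList, List.mem_filter]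
    simp
  show ((pvCalcUniqueYeses cs).2.length : Int) = _
  rw [hlen]

-- part 2 per-form agreement
theorem pv_part2_eq (cs : List Char) :
    pvCalcUniqueYesesPart2 cs
      = (((PySem.List.enumerate (PySem.Chars.splitOn cs [' ']) 0).foldl
          (fun (fs : PySem.Dict Char Int × PySem.Dict Char Int) ip =>
            ip.2.foldl (fun fs c =>
              if fs.2.get? c ≠ some ip.1 then
                (fs.1.insert c (fs.1.getD c 0 + 1), fs.2.insert c ip.1)
              else fs) fs) (PySem.Dict.empty, PySem.Dict.empty)).1.values.countP
            (fun v => v == ((PySem.Chars.splitOn cs [' ']).length : Int)) : Int) := by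
  obtain ⟨p0, rest, hsplit⟩ : ∃ p0 rest, PySem.Chars.splitOn cs [' '] = p0 :: rest := by
    cases h : PySem.Chars.splitOn cs [' '] with
    | nil => exact absurd h (pv_splitOn_ne_nil cs)
    | cons a b => exact ⟨a, b, rfl⟩
  have hns : ∀ p ∈ p0 :: rest, ' ' ∉ p := by rw [← hsplit]; exact pv_splitOn_no_space cs
  set people := PySem.Chars.splitOn cs [' '] with hpe
  -- B's count is the length of the filtered distinct-character list
  have hvals : ((PySem.List.enumerate people 0).foldl
          (fun (fs : PySem.Dict Char Int × PySem.Dict Char Int) ip =>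
            ip.2.foldl (fun fs c =>
              if fs.2.get? c ≠ some ip.1 then
                (fs.1.insert c (fs.1.getD c 0 + 1), fs.2.insert c ip.1)
              else fs) fs) (PySem.Dict.empty, PySem.Dict.empty)).1.values
      = (PySem.Set.ofList people.flatten).map
          (fun c => ((people.countP (fun p => decide (c ∈ p)) : Nat) : Int)) := by
    show ((PySem.List.enumerate people 0).foldl
          (fun (fs : PySem.Dict Char Int × PySem.Dict Char Int) ip =>
            ip.2.foldl (fun fs c =>
              if fs.2.get? c ≠ some ip.1 then
                (fs.1.insert c (fs.1.getD c 0 + 1), fs.2.insert c ip.1)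
              else fs) fs) (PySem.Dict.empty, PySem.Dict.empty)).1.items.map (·.2) = _
    rw [hpe, pv_hist, List.map_map]
    rfl
  rw [hvals, List.countP_map]
  have hfilter : ∀ (l : List Char) (f : Char → Bool), l.countP f = (l.filter f).length :=
    fun l f => List.countP_eq_length_filter
  rw [hfilter]
  -- A's side
  unfold pvCalcUniqueYesesPart2
  rw [← hpe]
  obtain ⟨hn, hm⟩ := pv_foldA people (pvCalcUniqueYeses (people.headD [])).2
    (pv_nodup_calcA _)
  have hlen : (people.foldl (fun cumulative persons_code =>
        PySem.Set.inter (PySem.Set.ofList (pvCalcUniqueYeses persons_code).2)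
          (PySem.Set.ofList cumulative)) (pvCalcUniqueYeses (people.headD [])).2).length
      = ((PySem.Set.ofList people.flatten).filter
          (fun c => ((people.countP (fun p => decide (c ∈ p)) : Nat) : Int)
              == ((people.length : Nat) : Int))).length := by
    apply pv_len_eq_of_nodup_mem _ _ hn
      (List.Nodup.filter _ (PySem.Set.nodup_ofList _))
    intro a
    rw [hm a, List.mem_filter, PySem.Set.mem_ofList]
    have hcnt : (((people.countP (fun p => decide (a ∈ p)) : Nat) : Int)
          == ((people.length : Nat) : Int)) = true
        ↔ ∀ p ∈ people, a ∈ p := by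
      rw [beq_iff_eq, Int.natCast_inj, List.countP_eq_length]
      simp
    constructor
    · rintro ⟨ha0, hall⟩
      have hap0 : a ∈ p0 := (hall p0 (by rw [hsplit]; exact List.mem_cons_self)).1
      refine ⟨List.mem_flatten.mpr ⟨p0, by rw [hsplit]; exact List.mem_cons_self, hap0⟩, ?_⟩
      exact hcnt.mpr (fun p hp => (hall p hp).1)
    · rintro ⟨haf, hcp⟩
      have hall : ∀ p ∈ people, a ∈ p := hcnt.mp hcp
      have hap0 : a ∈ p0 := hall p0 (by rw [hsplit]; exact List.mem_cons_self)
      have hane : a ≠ ' ' := fun h => hns p0 List.mem_cons_self (h ▸ hap0)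
      refine ⟨?_, fun p hp => ⟨hall p hp, hane⟩⟩
      rw [pv_mem_calcA]
      rw [hsplit]
      exact ⟨hap0, hane⟩
  exact congrArg (fun n : Nat => (n : Int)) hlen

-- per-form step agreement, lifted over the array fold
theorem pv_fold_eq (part : Int) (array : List String) : ∀ (s : Int),
    array.foldl (fun sum_value form =>
      let sum_value := if part = (1 : Int) then sum_value + (pvCalcUniqueYeses form.toList).1 else sum_value
      if part = 2 then sum_value + pvCalcUniqueYesesPart2 form.toList else sum_value) s
    = array.foldl (fun total form =>
      let people := PySem.Chars.splitOn form.toList [' ']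
      let fs := (PySem.List.enumerate people 0).foldl
        (fun (fs : PySem.Dict Char Int × PySem.Dict Char Int) ip =>
          ip.2.foldl (fun fs c =>
            if fs.2.get? c ≠ some ip.1 then
              (fs.1.insert c (fs.1.getD c 0 + 1), fs.2.insert c ip.1)
            else fs) fs)
        (PySem.Dict.empty, PySem.Dict.empty)
      let freq := fs.1
      if part = 1 then total + (freq.size : Int)
      else if part = 2 then
        total + ((freq.values.countP (fun v => v == (people.length : Int)) : Nat) : Int)
      else total) s := by
  induction array with
  | nil => intro s; rfl
  | cons f t ih =>
    intro s
    rw [List.foldl_cons, List.foldl_cons, ih]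
    congr 1
    by_cases h1 : part = (1 : Int)
    · simp only [h1, if_pos rfl, show (1 : Int) ≠ 2 by decide, if_neg, if_false]
      rw [pv_part1_eq]
    · by_cases h2 : part = (2 : Int)
      · simp only [h1, h2, if_neg (by decide : ¬ ((2:Int) = 1)), if_pos rfl, if_false]
        rw [pv_part2_eq]
      · simp [h1, h2]

-- ===== VERDICT (by name: the statement is the Claim_ definition above) =====
theorem process_forms_spec : Claim_equal_process_forms := by
  intro array part _
  unfold Spec_process_forms process_forms process_forms_alt
  exact pv_fold_eq part array 0
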